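-- pv_equiv track=rewrite | github.com/zgsm-ai/everything-ai-coding | scripts/llm_evaluator.py | _sanitize_field
-- ===== SOURCE A (Python) =====
-- def _sanitize_field(value: str, max_len: int = 200) -> str:
--     """Sanitize untrusted metadata before embedding in LLM prompt."""
--     if not isinstance(value, str):
--         return str(value)[:max_len]
--     value = "".join(
--         c for c in value if c == " " or (c.isprintable() and c not in "\r\n\t")
--     )
--     value = " ".join(value.split())
--     return value[:max_len]
-- ===== SOURCE B (Python) =====
-- def _sanitize_field(value: str, max_len: int = 200) -> str:
--     """Sanitize untrusted metadata before embedding in LLM prompt."""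
--     if not isinstance(value, str):
--         return str(value)[:max_len]
--     out = []
--     pending = False  # a kept space is waiting to be emitted before the next word char
--     for c in value:
--         if c == " ":
--             pending = True
--         elif c.isprintable() and c not in "\r\n\t":
--             if pending and out:
--                 out.append(" ")
--             out.append(c)
--             pending = False
--     return "".join(out)[:max_len]
-- ===== Notes on version B (the rewrite author's own statement) =====
-- stated objective: alternative
-- what changed: Replaced A's two sequential passes (a filter comprehension building an intermediate string, then a whitespace split-and-rejoin) by one explicit character loop with a pending-space flag that filters and collapses/strips whitespace simultaneously, without intermediate strings.
import Mathlib
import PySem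

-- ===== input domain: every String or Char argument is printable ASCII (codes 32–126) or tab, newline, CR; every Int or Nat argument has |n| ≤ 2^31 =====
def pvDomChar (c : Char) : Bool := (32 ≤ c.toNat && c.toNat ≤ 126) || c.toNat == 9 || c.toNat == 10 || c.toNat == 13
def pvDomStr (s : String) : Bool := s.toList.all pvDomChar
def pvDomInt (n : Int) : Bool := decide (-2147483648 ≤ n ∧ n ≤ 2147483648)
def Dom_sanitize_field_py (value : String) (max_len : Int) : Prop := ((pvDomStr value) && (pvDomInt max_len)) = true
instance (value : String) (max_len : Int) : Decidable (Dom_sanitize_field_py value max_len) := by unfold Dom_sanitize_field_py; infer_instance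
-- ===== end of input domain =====

-- B replaces A's two sequential passes (filter comprehension, then a whitespace split-and-rejoin)
-- by ONE explicit loop that filters and collapses whitespace simultaneously with a pending-space flag (objective: alternative decomposition).

-- Python c.isprintable(), exact on the ASCII domain (codes 32–126 printable, 0–31 and 127 not)
def pyPrintableAscii (c : Char) : Bool := 32 ≤ c.toNat && c.toNat ≤ 126

-- the character condition both Python sources write: c == " " or (c.isprintable() and c not in "\r\n\t")
def keepChar (c : Char) : Bool := c == ' ' || (pyPrintableAscii c && !(c == '\r' || c == '\n' || c == '\t'))

-- ===== PORT A =====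
def sanitize_field_py (value : String) (max_len : Int) : String :=
  let filtered := value.toList.filter keepChar
  let collapsed := PySem.Chars.join [' '] (PySem.Chars.split₀ filtered)
  String.ofList (PySem.List.slice collapsed none (some max_len))

-- ===== PORT B =====
def sanitizeLoop : List Char → List Char → Bool → List Char
  | [], out, _ => out
  | c :: rest, out, pending =>
    if c == ' ' then sanitizeLoop rest out true
    else if keepChar c then
      sanitizeLoop rest ((if pending && !out.isEmpty then out ++ [' '] else out) ++ [c]) false
    else sanitizeLoop rest out pending

def sanitize_field_py_alt (value : String) (max_len : Int) : String :=
  String.ofList (PySem.List.slice (sanitizeLoop value.toList [] false) none (some max_len))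

-- ===== PRECONDITION & SPEC =====
def Spec_sanitize_field_py (value : String) (max_len : Int) (out : String) : Prop := out = sanitize_field_py_alt value max_len
instance (value : String) (max_len : Int) (out : String) : Decidable (Spec_sanitize_field_py value max_len out) := by unfold Spec_sanitize_field_py; infer_instance

-- ===== CLAIM (what is proved, stated in full; the proofs are below) =====
def Claim_equal_sanitize_field_py : Prop := ∀ (value : String) (max_len : Int), Dom_sanitize_field_py value max_len → Spec_sanitize_field_py value max_len (sanitize_field_py value max_len)

-- ===== LEMMAS AND PROOFS =====

lemma join_sp_append (xs : List (List Char)) (w : List Char) :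
    PySem.Chars.join [' '] (xs ++ [w])
      = PySem.Chars.join [' '] xs ++ (if xs.isEmpty then ([] : List Char) else [' ']) ++ w := by
  induction xs with
  | nil => simp [PySem.Chars.join, List.intercalate]
  | cons x xs ih =>
    cases xs with
    | nil => simp [PySem.Chars.join, List.intercalate]
    | cons y ys =>
      simp only [List.cons_append] at *
      rw [PySem.Chars.join_cons_cons, PySem.Chars.join_cons_cons, ih]
      simp [List.append_assoc]

lemma join_sp_ne_nil (xs : List (List Char)) (hne : xs ≠ []) (h : ∀ w ∈ xs, w ≠ []) :
    PySem.Chars.join [' '] xs ≠ [] := by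
  cases xs with
  | nil => exact absurd rfl hne
  | cons x ys =>
    cases ys with
    | nil =>
      rw [PySem.Chars.join_singleton]
      exact h x (by simp)
    | cons y zs =>
      rw [PySem.Chars.join_cons_cons]
      have hx := h x (by simp)
      cases x with
      | nil => exact absurd rfl hx
      | cons a as => simp

lemma keep_isspace {c : Char} (h : keepChar c = true) :
    PySem.Chars.isspace c = (c == ' ') := by
  by_cases hc : c = ' '
  · subst hc; decide
  · have hbeq : (c == ' ') = false := by
      simp [hc]
    rw [hbeq]
    have hn : 32 ≤ c.toNat ∧ c.toNat ≤ 126 := by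
      simp only [keepChar, pyPrintableAscii, Bool.or_eq_true, Bool.and_eq_true,
        beq_iff_eq, decide_eq_true_eq] at h
      rcases h with h | ⟨⟨h1, h2⟩, _⟩
      · exact absurd h hc
      · exact ⟨h1, h2⟩
    have hne : c.toNat ≠ 32 := by
      intro h32
      apply hc
      apply Char.ext
      apply UInt32.toBitVec_inj.mp
      apply BitVec.toNat_inj.mp
      exact h32
    simp only [PySem.Chars.isspace]
    simp only [Bool.or_eq_false_iff, Bool.and_eq_false_iff, decide_eq_false_iff_not]
    omega

lemma sanitizeLoop_filter (v : List Char) (out : List Char) (p : Bool) :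
    sanitizeLoop v out p = sanitizeLoop (v.filter keepChar) out p := by
  induction v generalizing out p with
  | nil => simp
  | cons c rest ih =>
    by_cases hk : keepChar c = true
    · by_cases hs : c = ' '
      · subst hs
        simp [sanitizeLoop, hk, ih]
      · have : (c == ' ') = false := by simp [hs]
        simp [sanitizeLoop, hk, this, ih]
    · have hknot : keepChar c = false := by simpa using hk
      have hs : (c == ' ') = false := by
        cases h : (c == ' ') with
        | false => rfl
        | true =>
          have hc : c = ' ' := by simpa [beq_iff_eq] using h
          subst hc
          exact absurd hknot (by decide)
      simp [sanitizeLoop, hknot, hs, ih]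

lemma sanitizeLoop_eq_go (m : List Char) :
    ∀ (cur : List Char) (acc : List (List Char)) (out : List Char) (p : Bool),
    (∀ c ∈ m, keepChar c = true) →
    (∀ w ∈ acc, w ≠ []) →
    out = PySem.Chars.join [' '] acc.reverse
            ++ (if acc ≠ [] ∧ cur ≠ [] then [' '] else []) ++ cur.reverse →
    (cur ≠ [] → p = false) →
    (acc ≠ [] → cur = [] → p = true) →
    sanitizeLoop m out p = PySem.Chars.join [' '] (PySem.Chars.split₀.go m cur acc) := by
  induction m with
  | nil =>
    intro cur acc out p _ hacc hout _ _
    cases hc : cur with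
    | nil =>
      subst hc
      simp only [sanitizeLoop, PySem.Chars.split₀.go]
      simp at hout
      simp [hout]
    | cons a as =>
      subst hc
      simp only [sanitizeLoop, PySem.Chars.split₀.go]
      have : ((a :: as).reverse :: acc).reverse = acc.reverse ++ [(a :: as).reverse] := by simp
      rw [if_neg (by simp), this, join_sp_append]
      rw [hout]
      rcases acc with _ | ⟨b, bs⟩ <;> simp
  | cons c rest ih =>
    intro cur acc out p hk hacc hout hp1 hp2
    have hkc : keepChar c = true := hk c (by simp)
    have hkrest : ∀ x ∈ rest, keepChar x = true := fun x hx => hk x (by simp [hx])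
    have hsp : PySem.Chars.isspace c = (c == ' ') := keep_isspace hkc
    by_cases hc : c = ' '
    · subst hc
      have ht : ((' ' == ' ') = true) := rfl
      simp only [sanitizeLoop, PySem.Chars.split₀.go, hsp, if_pos ht]
      cases hcur : cur with
      | nil =>
        subst hcur
        rw [if_pos (by simp)]
        exact ih [] acc out true hkrest hacc (by simpa using hout)
          (by intro h; exact absurd rfl h) (fun _ _ => rfl)
      | cons a as =>
        subst hcur
        rw [if_neg (by simp)]
        refine ih [] ((a :: as).reverse :: acc) out true hkrest ?_ ?_
          (by intro h; exact absurd rfl h) (fun _ _ => rfl)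
        · intro w hw
          rcases List.mem_cons.mp hw with hw | hw
          · subst hw; simp
          · exact hacc w hw
        · have : ((a :: as).reverse :: acc).reverse = acc.reverse ++ [(a :: as).reverse] := by simp
          rw [this, join_sp_append, hout]
          rcases acc with _ | ⟨b, bs⟩ <;> simp
    · have hbeq : (c == ' ') = false := by simp [hc]
      have hff : ((c == ' ') = true) = False := by simp [hbeq]
      simp only [sanitizeLoop, PySem.Chars.split₀.go, hsp, hff, if_false, if_pos hkc]
      refine ih (c :: cur) acc _ false hkrest hacc ?_ (fun _ => rfl) (by intro _ h; cases h)
      cases hcur : cur with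
      | nil =>
        subst hcur
        rcases hacc' : acc with _ | ⟨b, bs⟩
        · subst hacc'
          simp at hout
          simp [hout]
        · have hp : p = true := hp2 (by simp [hacc']) rfl
          have houtne : out ≠ [] := by
            rw [hout]
            simp only [ne_eq, List.reverse_nil, List.append_nil]
            rw [if_neg (by simp [hacc'])]
            simp only [List.append_nil]
            exact join_sp_ne_nil _ (by simp [hacc']) (by
              intro w hw
              exact hacc w (List.mem_reverse.mp hw))
          have hoe : out.isEmpty = false := by simpa [List.isEmpty_iff] using houtne
          rw [hp, if_pos (by simp [hoe])]
          rw [hout]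
          simp [hacc']
      | cons a as =>
        subst hcur
        have hp : p = false := hp1 (by simp)
        rw [hp, if_neg (by simp)]
        rw [hout]
        rcases acc with _ | ⟨b, bs⟩ <;> simp

-- ===== VERDICT (by name: the statement is the Claim_ definition above) =====
theorem sanitize_field_py_spec : Claim_equal_sanitize_field_py := by
  intro value max_len _
  unfold Spec_sanitize_field_py sanitize_field_py sanitize_field_py_alt
  have h1 := sanitizeLoop_filter value.toList [] false
  have h2 := sanitizeLoop_eq_go (value.toList.filter keepChar) [] [] [] false
    (by intro c hc; exact (List.mem_filter.mp hc).2)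
    (by intro w hw; cases hw)
    (by simp)
    (by intro h; exact absurd rfl h)
    (by intro h; exact absurd rfl h)
  rw [h1, h2]
  rfl
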